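-- pv_equiv track=rewrite | github.com/Yawn-Sean/Daily_CF_Problems | daily_problems/2026/02/0203/personal_submission/cf105400e_liryc.py | solve
-- ===== SOURCE A (Python) =====
-- def solve(n: int, a: list[int]) -> int:
--     min_x, max_x = min(a), max(a)
--     ans = 1
--     for x in a:
--         if min_x == max_x:
--             ans *= 10
--         elif x == min_x:
--             ans *= x
--         elif x == max_x:
--             ans *= 10 - x + 1
--     return ans
-- ===== SOURCE B (Python) =====
-- def _run(s, v):
--     k = 0
--     for x in s:
--         if x != v:
--             break
--         k += 1
--     return k
--
--
-- def solve(n: int, a: list[int]) -> int: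
--     s = sorted(a)
--     if s[0] == s[-1]:
--         return 10 ** len(s)
--     return s[0] ** _run(s, s[0]) * (11 - s[-1]) ** _run(s[::-1], s[-1])
-- ===== Notes on version B (the rewrite author's own statement) =====
-- stated objective: alternative
-- what changed: B sorts the list and reads the min/max multiplicities off as boundary run lengths of the sorted list (leading run and leading run of the reversal), combining them as two powers, instead of A's per-element accumulating multiply-loop over the unsorted list with precomputed min/max.
import Mathlib
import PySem

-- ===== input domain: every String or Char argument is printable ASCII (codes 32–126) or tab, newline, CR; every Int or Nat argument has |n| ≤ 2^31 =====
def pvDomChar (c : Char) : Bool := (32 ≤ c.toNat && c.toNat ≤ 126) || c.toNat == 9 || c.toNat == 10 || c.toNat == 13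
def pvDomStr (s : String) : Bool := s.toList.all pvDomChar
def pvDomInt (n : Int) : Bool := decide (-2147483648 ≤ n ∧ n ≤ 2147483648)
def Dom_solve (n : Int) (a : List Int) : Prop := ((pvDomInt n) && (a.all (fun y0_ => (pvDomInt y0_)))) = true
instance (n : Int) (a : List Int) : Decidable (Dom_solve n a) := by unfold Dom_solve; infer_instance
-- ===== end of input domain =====

-- B sorts the list and reads the min/max multiplicities off as boundary run lengths of
-- the sorted list, instead of A's per-element accumulating multiply-loop (objective: alternative).

-- ===== PORT A =====
def solve (n : Int) (a : List Int) : Int :=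
  let min_x := (PySem.List.min? a (fun x => x)).getD 0
  let max_x := (PySem.List.max? a (fun x => x)).getD 0
  a.foldl (fun ans x =>
    if min_x == max_x then ans * 10
    else if x == min_x then ans * x
    else if x == max_x then ans * (10 - x + 1)
    else ans) 1

-- ===== PORT B =====
-- port of Source B's _run: the for-loop with break counting the leading run of v
def pvRun (s : List Int) (v : Int) : Nat :=
  match s with
  | [] => 0
  | x :: t => if x == v then pvRun t v + 1 else 0

def solve_alt (n : Int) (a : List Int) : Int :=
  let s := PySem.List.sorted a (fun x => x) false
  let lo := (PySem.List.pyGet? s 0).getD 0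
  let hi := (PySem.List.pyGet? s (-1)).getD 0
  if lo == hi then (10 : Int) ^ s.length
  else
    -- s[::-1] is exactly s.reverse (PySem.List.slice?_none_none_neg_one)
    lo ^ pvRun s lo * (11 - hi) ^ pvRun s.reverse hi

-- ===== PRECONDITION & SPEC =====
-- Pre_ excludes only the empty list, on which Python raises an IndexError/ValueError (in A via min(a), in B via s[0]).
def Pre_solve (n : Int) (a : List Int) : Prop := a ≠ []
instance (n : Int) (a : List Int) : Decidable (Pre_solve n a) := by unfold Pre_solve; infer_instance
def pvWitness_solve : Int × List Int := (3, [1, 2, 3])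

def Spec_solve (n : Int) (a : List Int) (out : Int) : Prop := out = solve_alt n a
instance (n : Int) (a : List Int) (out : Int) : Decidable (Spec_solve n a out) := by unfold Spec_solve; infer_instance

-- ===== CLAIM (what is proved, stated in full; the proofs are below) =====
def Claim_equal_solve : Prop := ∀ (n : Int) (a : List Int), Dom_solve n a → Pre_solve n a → Spec_solve n a (solve n a)

-- ===== LEMMAS AND PROOFS =====

-- A's loop in the all-equal branch multiplies 10 once per element.
theorem foldl_mul_ten (a : List Int) (acc : Int) :
    a.foldl (fun ans _ => ans * 10) acc = acc * 10 ^ a.length := by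
  induction a generalizing acc with
  | nil => simp
  | cons x t ih => simp [List.foldl, ih, pow_succ]; ring

-- A's loop in the lo ≠ hi branch is the count-based closed form.
theorem foldl_lo_hi (lo hi : Int) (hne : lo ≠ hi) (a : List Int) (acc : Int) :
    a.foldl (fun ans x =>
        if x == lo then ans * x
        else if x == hi then ans * (10 - x + 1)
        else ans) acc
      = acc * lo ^ (a.count lo) * (11 - hi) ^ (a.count hi) := by
  induction a generalizing acc with
  | nil => simp
  | cons x t ih =>
    rw [List.foldl_cons]
    by_cases hxl : x = lo
    · subst hxl
      simp only [beq_self_eq_true, if_true]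
      rw [ih, List.count_cons_self, List.count_cons_of_ne hne, pow_succ]
      ring
    · by_cases hxh : x = hi
      · subst hxh
        have h1 : (x == lo) = false := by simp [hxl]
        simp only [h1, Bool.false_eq_true, if_false, beq_self_eq_true, if_true]
        rw [ih, List.count_cons_self, List.count_cons_of_ne hxl, pow_succ]
        ring
      · have h1 : (x == lo) = false := by simp [hxl]
        have h2 : (x == hi) = false := by simp [hxh]
        simp only [h1, h2, Bool.false_eq_true, if_false]
        rw [ih, List.count_cons_of_ne hxl, List.count_cons_of_ne hxh]

-- In a ≤-sorted list whose elements all dominate v, the leading run of v is its count.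
theorem pvRun_eq_count_asc (l : List Int) (v : Int)
    (hp : l.Pairwise (· ≤ ·)) (hv : ∀ y ∈ l, v ≤ y) :
    pvRun l v = l.count v := by
  induction l with
  | nil => simp [pvRun]
  | cons x t ih =>
    rw [List.pairwise_cons] at hp
    by_cases hx : x = v
    · subst hx
      simp only [pvRun, beq_self_eq_true, if_true]
      rw [List.count_cons_self, ih hp.2 (fun y hy => hv y (List.mem_cons_of_mem _ hy))]
    · have hb : (x == v) = false := by simp [hx]
      have hvx : v < x := lt_of_le_of_ne (hv x (List.mem_cons_self)) (fun h => hx h.symm)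
      have hnot : v ∉ t := fun hmem => absurd (hp.1 v hmem) (not_le.mpr hvx)
      simp [pvRun, hb, hx, List.count_eq_zero.mpr hnot]

-- Dual: ≥-sorted list whose elements are all ≤ v.
theorem pvRun_eq_count_desc (l : List Int) (v : Int)
    (hp : l.Pairwise (fun a b => b ≤ a)) (hv : ∀ y ∈ l, y ≤ v) :
    pvRun l v = l.count v := by
  induction l with
  | nil => simp [pvRun]
  | cons x t ih =>
    rw [List.pairwise_cons] at hp
    by_cases hx : x = v
    · subst hx
      simp only [pvRun, beq_self_eq_true, if_true]
      rw [List.count_cons_self, ih hp.2 (fun y hy => hv y (List.mem_cons_of_mem _ hy))]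
    · have hb : (x == v) = false := by simp [hx]
      have hxv : x < v := lt_of_le_of_ne (hv x (List.mem_cons_self)) hx
      have hnot : v ∉ t := fun hmem => absurd (hp.1 v hmem) (not_le.mpr hxv)
      simp [pvRun, hb, hx, List.count_eq_zero.mpr hnot]

-- ===== VERDICT (by name: the statement is the Claim_ definition above) =====
theorem solve_spec : Claim_equal_solve := by
  intro n a _ hpre
  unfold Spec_solve solve solve_alt
  dsimp only
  -- A's extremal values
  obtain ⟨lo, hlo⟩ : ∃ m, PySem.List.min? a (fun x => x) = some m := by
    cases h : PySem.List.min? a (fun x => x) with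
    | none => exact absurd ((PySem.List.min?_eq_none_iff a _).mp h) hpre
    | some m => exact ⟨m, rfl⟩
  obtain ⟨hi, hhi⟩ : ∃ m, PySem.List.max? a (fun x => x) = some m := by
    cases h : PySem.List.max? a (fun x => x) with
    | none => exact absurd ((PySem.List.max?_eq_none_iff a _).mp h) hpre
    | some m => exact ⟨m, rfl⟩
  have hlo_mem : lo ∈ a := PySem.List.min?_mem hlo
  have hhi_mem : hi ∈ a := PySem.List.max?_mem hhi
  have hlo_min : ∀ y ∈ a, lo ≤ y := PySem.List.min?_isMin hlo
  have hhi_max : ∀ y ∈ a, y ≤ hi := PySem.List.max?_isMax hhi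
  -- the sorted list and its reverse
  set s := PySem.List.sorted a (fun x => x) false with hs
  have hperm : s.Perm a := PySem.List.sorted_perm a (fun x => x) false
  have hsp : s.Pairwise (fun x y : Int => x ≤ y) := PySem.List.sorted_pairwise a (fun x => x)
  have hsne : s ≠ [] := by
    intro h
    rw [h] at hperm
    exact hpre hperm.symm.eq_nil
  obtain ⟨m, t, hst⟩ : ∃ m t, s = m :: t := List.exists_cons_of_ne_nil hsne
  have hrne : s.reverse ≠ [] := by simpa using hsne
  obtain ⟨u, rt, hrt⟩ : ∃ u rt, s.reverse = u :: rt := List.exists_cons_of_ne_nil hrne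
  have hmem_s : ∀ y, y ∈ s ↔ y ∈ a := fun y => hperm.mem_iff
  have hrp : s.reverse.Pairwise (fun x y : Int => y ≤ x) :=
    List.pairwise_reverse.mpr hsp
  -- head of sorted = lo
  have hm_lo : m = lo := by
    have h1 : ∀ y ∈ a, m ≤ y := PySem.List.key_head_sorted_le a (fun x => x) hst
    have h2 : m ∈ a := (hmem_s m).mp (hst ▸ List.mem_cons_self)
    exact le_antisymm (h1 lo hlo_mem) (hlo_min m h2)
  -- head of reversed sorted = hi
  have hu_max : ∀ y ∈ s.reverse, y ≤ u := by
    intro y hy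
    rw [hrt] at hy
    rcases List.mem_cons.mp hy with h | h
    · exact h ▸ le_refl y
    · exact ((List.pairwise_cons.mp (hrt ▸ hrp)).1 y h)
  have hu_hi : u = hi := by
    have h2 : u ∈ a := (hmem_s u).mp (List.mem_reverse.mp (hrt ▸ List.mem_cons_self))
    exact le_antisymm (hhi_max u h2)
      (hu_max hi (List.mem_reverse.mpr ((hmem_s hi).mpr hhi_mem)))
  -- B's indexed reads
  have hget0 : (PySem.List.pyGet? s 0).getD 0 = m := by
    rw [hst, PySem.List.pyGet?_zero_cons]; rfl
  have hgetm1 : (PySem.List.pyGet? s (-1)).getD 0 = u := by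
    rw [PySem.List.pyGet?_neg_one, ← List.head?_reverse, hrt]; rfl
  rw [hlo, hhi, hget0, hgetm1, hm_lo, hu_hi]
  simp only [Option.getD_some]
  by_cases h : lo = hi
  · subst h
    simp only [beq_self_eq_true, if_true]
    rw [foldl_mul_ten, hperm.length_eq, one_mul]
  · have hb : (lo == hi) = false := by simp [h]
    simp only [hb, Bool.false_eq_true, if_false]
    have hrun1 : pvRun s lo = s.count lo := by
      refine pvRun_eq_count_asc s lo hsp (fun y hy => hlo_min y ((hmem_s y).mp hy))
    have hrun2 : pvRun s.reverse hi = s.count hi := by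
      rw [pvRun_eq_count_desc s.reverse hi hrp
        (fun y hy => hhi_max y ((hmem_s y).mp (List.mem_reverse.mp hy)))]
      exact List.count_reverse
    have hA := foldl_lo_hi lo hi h a 1
    rw [one_mul] at hA
    rw [hrun1, hrun2, hperm.count_eq, hperm.count_eq]
    exact hA
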